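-- pv_equiv track=rewrite | github.com/steeevan/PCEP-PREP | smapleDay6.py | class_summary
-- ===== SOURCE A (Python) =====
-- def class_summary(class_grades):
--      '''
--      -------------------------------------------------------------------------------------------------------------
--      Name: class_summary
--      Description: This should calculate the frequency of each Letter grade, and store it into
--      a dictionary. It then returns the dictionary.
--
--      Input:
--           + class_grades : This represents the list of letter grades of the class
--      Output:
--           + dictionary_grades : This represents the table frequency of the class.
--
--      Local Variables:
--           + dictionary_grades : This represents the table frequency of the class.
--           + keys : keeps track of the keys in our dictionary
--      -------------------------------------------------------------------------------------------------------------
--      '''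
--      dictionary_grades = {}
--      for letter_grade in class_grades:
--           keys = dictionary_grades.keys()
--           if letter_grade in keys:
--                dictionary_grades[letter_grade] += 1
--           else:
--                dictionary_grades[letter_grade] = 1
--      return dictionary_grades
-- ===== SOURCE B (Python) =====
-- def class_summary(class_grades):
--     return {grade: class_grades.count(grade)
--             for grade in dict.fromkeys(class_grades)}
-- ===== Notes on version B (the rewrite author's own statement) =====
-- stated objective: idiomatic
-- what changed: Replaces the incremental check-and-update dictionary loop with a dict comprehension over the ordered distinct grades (dict.fromkeys) counting each with list.count.
import Mathlib
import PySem

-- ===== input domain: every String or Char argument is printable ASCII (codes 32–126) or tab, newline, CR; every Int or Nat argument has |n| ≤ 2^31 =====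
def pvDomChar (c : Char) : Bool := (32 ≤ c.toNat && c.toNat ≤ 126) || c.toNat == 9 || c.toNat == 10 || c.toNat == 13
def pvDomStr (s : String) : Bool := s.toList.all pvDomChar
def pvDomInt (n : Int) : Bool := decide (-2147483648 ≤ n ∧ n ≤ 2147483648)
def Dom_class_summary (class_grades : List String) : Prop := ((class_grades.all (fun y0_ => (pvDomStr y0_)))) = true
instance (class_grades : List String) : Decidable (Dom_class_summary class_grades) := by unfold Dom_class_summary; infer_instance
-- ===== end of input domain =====

-- B replaces A's incremental check-and-update dictionary loop with a dict
-- comprehension over the ordered distinct grades, counting each with list.count (idiomatic).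

-- ===== PORT A =====
-- literal port: dictionary accumulated over the list; 'letter_grade in keys' then += 1 / = 1
def class_summary (class_grades : List String) : List (String × Int) :=
  (class_grades.foldl
    (fun d letter_grade =>
      if d.keys.contains letter_grade then
        d.insert letter_grade (d.getD letter_grade 0 + 1)
      else
        d.insert letter_grade 1)
    (PySem.Dict.empty : PySem.Dict String Int)).items

-- ===== PORT B =====
-- literal port of Source B: ordered distinct keys (dict.fromkeys = PySem.List.dedup), each paired with its count
def class_summary_alt (class_grades : List String) : List (String × Int) :=
  (PySem.List.dedup class_grades).map (fun grade => (grade, (class_grades.count grade : Int)))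

-- ===== PRECONDITION & SPEC =====
def Spec_class_summary (class_grades : List String) (out : List (String × Int)) : Prop := out = class_summary_alt class_grades
instance (class_grades : List String) (out : List (String × Int)) : Decidable (Spec_class_summary class_grades out) := by unfold Spec_class_summary; infer_instance

-- ===== CLAIM (what is proved, stated in full; the proofs are below) =====
def Claim_equal_class_summary : Prop := ∀ (class_grades : List String), Dom_class_summary class_grades → Spec_class_summary class_grades (class_summary class_grades)

-- ===== LEMMAS AND PROOFS =====
-- A's loop body is, in both branches, insert k (getD k 0 + 1); hence the loop is Counter(xs).
theorem stepA_eq_counter_step (d : PySem.Dict String Int) (x : String) :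
    (if d.keys.contains x then d.insert x (d.getD x 0 + 1) else d.insert x 1)
      = d.insert x (d.getD x 0 + 1) := by
  split_ifs with hif
  · rfl
  · have hm : x ∉ d.keys := by simpa using hif
    have h0 : d.get? x = none := (PySem.Dict.get?_eq_none_iff_not_mem_keys _ _).mpr hm
    rw [PySem.Dict.getD_eq_get?_getD, h0]
    simp

-- ===== VERDICT (by name: the statement is the Claim_ definition above) =====
theorem class_summary_spec : Claim_equal_class_summary := by
  intro class_grades _
  unfold Spec_class_summary class_summary class_summary_alt
  have hfold :
      class_grades.foldl
        (fun d letter_grade =>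
          if d.keys.contains letter_grade then
            d.insert letter_grade (d.getD letter_grade 0 + 1)
          else
            d.insert letter_grade 1)
        (PySem.Dict.empty : PySem.Dict String Int)
      = class_grades.foldl (fun d x => d.insert x (d.getD x 0 + 1)) PySem.Dict.empty := by
    have : (fun (d : PySem.Dict String Int) (x : String) =>
        if d.keys.contains x then d.insert x (d.getD x 0 + 1) else d.insert x 1)
        = fun d x => d.insert x (d.getD x 0 + 1) := by
      funext d x; exact stepA_eq_counter_step d x
    rw [this]
  rw [hfold, PySem.Dict.foldl_insert_getD_add_one_eq_counter,
      PySem.Dict.items_counter, PySem.List.dedup_eq_ofList]
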